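-- pv_equiv track=rewrite | github.com/ahmadzulfadli/paroid-chatboot | chat.py | _apply_hijab
-- ===== SOURCE A (Python) =====
-- def _apply_hijab(heirs):
--     active = heirs.copy()
--     if 'anak_laki' in active:
--         for h in ['cucu_laki', 'cucu_perempuan', 'saudara_kandung', 'saudara_seayah', 'saudara_seibu', 'paman_kandung']:
--             if h in active: del active[h]
--     if 'ayah' in active:
--         for h in ['kakek', 'saudara_seibu', 'saudara_kandung', 'saudara_seayah', 'paman_kandung']:
--             if h in active: del active[h]
--     if 'ibu' in active:
--         for h in ['nenek_ibu', 'nenek_ayah']: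
--             if h in active: del active[h]
--     return active
-- ===== SOURCE B (Python) =====
-- # Inverted index: each removable heir maps to the triggers that block it; a single
-- # per-heir filter asks "is any of MY blockers present?" (no trigger-driven deletion loops).
-- _BLOCKERS = {
--     'cucu_laki': ('anak_laki',),
--     'cucu_perempuan': ('anak_laki',),
--     'saudara_kandung': ('anak_laki', 'ayah'),
--     'saudara_seayah': ('anak_laki', 'ayah'),
--     'saudara_seibu': ('anak_laki', 'ayah'),
--     'paman_kandung': ('anak_laki', 'ayah'),
--     'kakek': ('ayah',),
--     'nenek_ibu': ('ibu',),
--     'nenek_ayah': ('ibu',),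
-- }
--
-- def _apply_hijab(heirs):
--     return {k: v for k, v in heirs.items()
--             if not any(t in heirs for t in _BLOCKERS.get(k, ()))}
-- ===== Notes on version B (the rewrite author's own statement) =====
-- stated objective: simpler
-- what changed: Inverts the rule table (each heir maps to the triggers that block it) and keeps each heir by a per-heir 'any of my blockers present?' test in one filtering pass, instead of A's three trigger-driven copy-and-delete loops; correct because no trigger key occurs in any block list, so presence in A's mutated copy equals presence in the original dict.
import Mathlib
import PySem

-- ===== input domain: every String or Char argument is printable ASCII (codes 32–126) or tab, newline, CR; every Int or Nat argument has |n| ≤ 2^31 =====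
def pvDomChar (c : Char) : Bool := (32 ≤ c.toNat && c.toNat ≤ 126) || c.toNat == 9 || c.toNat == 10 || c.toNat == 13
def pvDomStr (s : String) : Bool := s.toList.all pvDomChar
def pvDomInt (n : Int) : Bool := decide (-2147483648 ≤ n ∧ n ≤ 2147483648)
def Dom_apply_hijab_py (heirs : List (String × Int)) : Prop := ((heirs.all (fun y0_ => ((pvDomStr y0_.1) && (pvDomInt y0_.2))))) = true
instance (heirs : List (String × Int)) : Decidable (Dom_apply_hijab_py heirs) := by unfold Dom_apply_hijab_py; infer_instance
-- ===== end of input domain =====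

-- B inverts the rule table (heir -> its blockers) and keeps each heir by one per-heir
-- "any of my blockers present?" test in a single filtering pass (objective: simpler).


-- ===== PORT A =====
-- 'k in d' on a dict represented as its insertion-ordered association list
def pvContainsKey (d : List (String × Int)) (k : String) : Bool := d.any (fun p => p.1 == k)

-- 'if h in active: del active[h]'
def pvDelIf (d : List (String × Int)) (h : String) : List (String × Int) :=
  if pvContainsKey d h then d.filter (fun p => !(p.1 == h)) else d

def pvBlockA : List String := ["cucu_laki", "cucu_perempuan", "saudara_kandung", "saudara_seayah", "saudara_seibu", "paman_kandung"]
def pvBlockB : List String := ["kakek", "saudara_seibu", "saudara_kandung", "saudara_seayah", "paman_kandung"]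
def pvBlockC : List String := ["nenek_ibu", "nenek_ayah"]

def apply_hijab_py (heirs : List (String × Int)) : List (String × Int) :=
  let active := heirs
  let active := if pvContainsKey active "anak_laki" then pvBlockA.foldl pvDelIf active else active
  let active := if pvContainsKey active "ayah" then pvBlockB.foldl pvDelIf active else active
  let active := if pvContainsKey active "ibu" then pvBlockC.foldl pvDelIf active else active
  active

-- ===== PORT B =====
-- _BLOCKERS: inverted index, heir -> triggers that block it
def pvBlockers : PySem.Dict String (List String) :=
  PySem.Dict.mk [("cucu_laki", ["anak_laki"]), ("cucu_perempuan", ["anak_laki"]),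
   ("saudara_kandung", ["anak_laki", "ayah"]), ("saudara_seayah", ["anak_laki", "ayah"]),
   ("saudara_seibu", ["anak_laki", "ayah"]), ("paman_kandung", ["anak_laki", "ayah"]),
   ("kakek", ["ayah"]), ("nenek_ibu", ["ibu"]), ("nenek_ayah", ["ibu"])]

def apply_hijab_py_alt (heirs : List (String × Int)) : List (String × Int) :=
  heirs.filter (fun p =>
    !((PySem.Dict.getD pvBlockers p.1 []).any (fun t => pvContainsKey heirs t)))

-- ===== PRECONDITION & SPEC =====
def Spec_apply_hijab_py (heirs : List (String × Int)) (out : List (String × Int)) : Prop := out = apply_hijab_py_alt heirs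
instance (heirs : List (String × Int)) (out : List (String × Int)) : Decidable (Spec_apply_hijab_py heirs out) := by unfold Spec_apply_hijab_py; infer_instance

-- ===== CLAIM (what is proved, stated in full; the proofs are below) =====
def Claim_equal_apply_hijab_py : Prop := ∀ (heirs : List (String × Int)), Dom_apply_hijab_py heirs → Spec_apply_hijab_py heirs (apply_hijab_py heirs)

-- ===== LEMMAS AND PROOFS =====

-- 'if h in d: del d[h]' always equals the unconditional filter (filtering an absent key is the identity)
theorem pvDelIf_eq_filter (d : List (String × Int)) (h : String) :
    pvDelIf d h = d.filter (fun p => !(p.1 == h)) := by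
  unfold pvDelIf pvContainsKey
  split
  · rfl
  · next hc =>
    refine (List.filter_eq_self.mpr ?_).symm
    intro p hp
    simp only [Bool.not_eq_true, List.any_eq_false] at hc
    simp [hc p hp]

-- the delete loop over a key list is one filter by "key not among the deleted ones"
theorem foldl_pvDelIf (ks : List String) (d : List (String × Int)) :
    ks.foldl pvDelIf d = d.filter (fun p => !(ks.any (fun k => p.1 == k))) := by
  induction ks generalizing d with
  | nil => simp only [List.foldl_nil, List.any_nil, Bool.not_false, List.filter_true]
  | cons k ks ih =>
    rw [List.foldl_cons, pvDelIf_eq_filter, ih, List.filter_filter]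
    apply List.filter_congr
    intro p _
    simp [Bool.not_or, Bool.and_comm]

-- a contains-check survives the delete-loop's filter when its key is not among the deleted ones
theorem pvContainsKey_filter (d : List (String × Int)) (ks : List String) (k : String)
    (hk : ks.any (fun s => k == s) = false) :
    pvContainsKey (d.filter (fun p => !(ks.any (fun s => p.1 == s)))) k = pvContainsKey d k := by
  unfold pvContainsKey
  rw [List.any_filter]
  apply PySem.List.any_congr_mem
  intro p _
  cases hp : (p.1 == k) with
  | false => simp
  | true =>
    have h1 : p.1 = k := eq_of_beq hp
    simp [h1, hk]

-- B's per-heir blocker test, expressed through the three trigger flags on the original dict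
theorem pvBlockers_spec (heirs : List (String × Int)) (k : String) :
    (PySem.Dict.getD pvBlockers k []).any (fun t => pvContainsKey heirs t)
      = ((pvContainsKey heirs "anak_laki" && pvBlockA.any (fun s => k == s)) ||
         (pvContainsKey heirs "ayah" && pvBlockB.any (fun s => k == s)) ||
         (pvContainsKey heirs "ibu" && pvBlockC.any (fun s => k == s))) := by
  by_cases h1 : k = "cucu_laki"; · subst h1; simp [pvBlockers, PySem.Dict.getD_eq_get?_getD, PySem.Dict.get?_mk_cons, pvBlockA, pvBlockB, pvBlockC]
  by_cases h2 : k = "cucu_perempuan"; · subst h2; simp [pvBlockers, PySem.Dict.getD_eq_get?_getD, PySem.Dict.get?_mk_cons, pvBlockA, pvBlockB, pvBlockC]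
  by_cases h3 : k = "saudara_kandung"; · subst h3; simp [pvBlockers, PySem.Dict.getD_eq_get?_getD, PySem.Dict.get?_mk_cons, pvBlockA, pvBlockB, pvBlockC, Bool.or_comm]
  by_cases h4 : k = "saudara_seayah"; · subst h4; simp [pvBlockers, PySem.Dict.getD_eq_get?_getD, PySem.Dict.get?_mk_cons, pvBlockA, pvBlockB, pvBlockC, Bool.or_comm]
  by_cases h5 : k = "saudara_seibu"; · subst h5; simp [pvBlockers, PySem.Dict.getD_eq_get?_getD, PySem.Dict.get?_mk_cons, pvBlockA, pvBlockB, pvBlockC, Bool.or_comm]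
  by_cases h6 : k = "paman_kandung"; · subst h6; simp [pvBlockers, PySem.Dict.getD_eq_get?_getD, PySem.Dict.get?_mk_cons, pvBlockA, pvBlockB, pvBlockC, Bool.or_comm]
  by_cases h7 : k = "kakek"; · subst h7; simp [pvBlockers, PySem.Dict.getD_eq_get?_getD, PySem.Dict.get?_mk_cons, pvBlockA, pvBlockB, pvBlockC]
  by_cases h8 : k = "nenek_ibu"; · subst h8; simp [pvBlockers, PySem.Dict.getD_eq_get?_getD, PySem.Dict.get?_mk_cons, pvBlockA, pvBlockB, pvBlockC]
  by_cases h9 : k = "nenek_ayah"; · subst h9; simp [pvBlockers, PySem.Dict.getD_eq_get?_getD, PySem.Dict.get?_mk_cons, pvBlockA, pvBlockB, pvBlockC]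
  simp [pvBlockers, PySem.Dict.getD_eq_get?_getD, PySem.Dict.get?_mk_cons, pvBlockA, pvBlockB, pvBlockC,
        Ne.symm h1, Ne.symm h2, Ne.symm h3, Ne.symm h4, Ne.symm h5, Ne.symm h6, Ne.symm h7,
        Ne.symm h8, Ne.symm h9, h1, h2, h3, h4, h5, h6, h7, h8, h9, PySem.Dict.get?]

-- ===== VERDICT (by name: the statement is the Claim_ definition above) =====
theorem apply_hijab_py_spec : Claim_equal_apply_hijab_py := by
  intro heirs _
  unfold Spec_apply_hijab_py apply_hijab_py apply_hijab_py_alt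
  simp only [foldl_pvDelIf]
  rcases Bool.eq_false_or_eq_true (pvContainsKey heirs "anak_laki") with hc1 | hc1 <;>
    rcases Bool.eq_false_or_eq_true (pvContainsKey heirs "ayah") with hc2 | hc2 <;>
      rcases Bool.eq_false_or_eq_true (pvContainsKey heirs "ibu") with hc3 | hc3 <;>
        simp only [hc1, hc2, hc3,
          pvContainsKey_filter _ pvBlockA "ayah" (by decide),
          pvContainsKey_filter _ pvBlockA "ibu" (by decide),
          pvContainsKey_filter _ pvBlockB "ibu" (by decide),
          Bool.false_eq_true, if_false, if_true] <;>
        (try simp only [List.filter_filter]) <;>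
        first
          | (refine (List.filter_eq_self.mpr (fun p _ => ?_)).symm
             rw [pvBlockers_spec, hc1, hc2, hc3]; simp)
          | (refine List.filter_congr (fun p _ => ?_)
             rw [pvBlockers_spec, hc1, hc2, hc3]
             simp [Bool.and_comm, Bool.and_left_comm, Bool.and_assoc])
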